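-- pv_equiv track=rewrite | github.com/victor198siete/bromelia-odoo-modules | l10n_mx_einvoice/metodos.py | return_index_floats
-- ===== SOURCE A (Python) =====
-- def return_index_floats(decimales):
--     i = len(decimales) - 1
--     indice = 0
--     while(i > 0):
--         if  decimales[i] != '0':
--             indice = i
--             i = -1
--         else:
--             i-=1
--     return  indice
-- ===== SOURCE B (Python) =====
-- def return_index_floats(decimales):
--     return max((i for i, c in enumerate(decimales) if i > 0 and c != '0'), default=0)
-- ===== Notes on version B (the rewrite author's own statement) =====
-- stated objective: idiomatic
-- what changed: Replaced A's right-to-left while loop (return the first non-'0' index found scanning backwards, i>0) with a single forward pass: the maximum over enumerate of the indices i>0 whose char is not '0', with default 0.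
import Mathlib
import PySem

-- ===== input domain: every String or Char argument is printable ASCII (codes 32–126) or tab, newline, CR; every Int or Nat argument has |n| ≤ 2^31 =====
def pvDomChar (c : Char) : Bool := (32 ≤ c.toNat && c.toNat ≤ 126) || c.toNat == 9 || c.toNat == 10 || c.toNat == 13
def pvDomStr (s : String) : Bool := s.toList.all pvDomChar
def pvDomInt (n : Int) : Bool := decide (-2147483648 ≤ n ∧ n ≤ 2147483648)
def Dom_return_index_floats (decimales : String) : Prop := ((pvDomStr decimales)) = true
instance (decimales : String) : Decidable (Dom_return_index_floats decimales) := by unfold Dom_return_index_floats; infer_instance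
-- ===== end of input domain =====

-- B replaces A's backward first-match while loop with a forward pass: the maximum of the
-- indices i > 0 whose character is not '0' (default 0); objective: idiomatic.

-- ===== PORT A =====
-- the while loop of A: i counts down; index 0 is never returned by the scan (while i > 0)
def pvALoop (cs : List Char) : Nat → Int
  | 0 => 0
  | i + 1 => if cs.getD (i + 1) '\x00' ≠ '0' then ((i : Int) + 1) else pvALoop cs i

def return_index_floats (decimales : String) : Int :=
  pvALoop decimales.toList (decimales.toList.length - 1)

-- ===== PORT B =====
-- max((i for i, c in enumerate(decimales) if i > 0 and c != '0'), default=0)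
def return_index_floats_alt (decimales : String) : Int :=
  ((PySem.List.enumerate decimales.toList 0).filterMap
      (fun p => if 0 < p.1 ∧ p.2 ≠ '0' then some p.1 else none)).foldl max 0

-- ===== PRECONDITION & SPEC =====
def Spec_return_index_floats (decimales : String) (out : Int) : Prop := out = return_index_floats_alt decimales
instance (decimales : String) (out : Int) : Decidable (Spec_return_index_floats decimales out) := by unfold Spec_return_index_floats; infer_instance

-- ===== CLAIM (what is proved, stated in full; the proofs are below) =====
def Claim_equal_return_index_floats : Prop := ∀ (decimales : String), Dom_return_index_floats decimales → Spec_return_index_floats decimales (return_index_floats decimales)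

-- ===== LEMMAS AND PROOFS =====

def pvIdxs (cs : List Char) : List Int :=
  (PySem.List.enumerate cs 0).filterMap (fun p => if 0 < p.1 ∧ p.2 ≠ '0' then some p.1 else none)

-- pvALoop only inspects indices ≤ j, so appending past the end does not change it
theorem pvALoop_append (ds e : List Char) (j : Nat) (h : j < ds.length) :
    pvALoop (ds ++ e) j = pvALoop ds j := by
  induction j with
  | zero => rfl
  | succ i ih =>
    simp only [pvALoop]
    rw [List.getD_append _ _ _ _ h, ih (Nat.lt_of_succ_lt h)]

theorem pvFoldMax_le (l : List Int) (a n : Int) (hl : ∀ x ∈ l, x ≤ n) (ha : a ≤ n) :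
    l.foldl max a ≤ n := by
  induction l generalizing a with
  | nil => exact ha
  | cons x xs ih =>
    exact ih (max a x) (fun y hy => hl y (List.mem_cons_of_mem _ hy))
      (max_le ha (hl x List.mem_cons_self))

theorem pvIdxs_lt (cs : List Char) : ∀ x ∈ pvIdxs cs, x ≤ (cs.length : Int) - 1 := by
  intro x hx
  simp only [pvIdxs, List.mem_filterMap] at hx
  obtain ⟨p, hp, hif⟩ := hx
  split at hif
  · cases hif
    rw [PySem.List.mem_enumerate_iff] at hp
    obtain ⟨k, hk, rfl⟩ := hp
    simp
    omega
  · cases hif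

theorem pvIdxs_append (ds : List Char) (c : Char) :
    pvIdxs (ds ++ [c]) =
      pvIdxs ds ++ (if 0 < (ds.length : Int) ∧ c ≠ '0' then [(ds.length : Int)] else []) := by
  simp only [pvIdxs, PySem.List.enumerate_append, List.filterMap_append,
    PySem.List.enumerate_cons, PySem.List.enumerate_nil, List.filterMap_cons,
    List.filterMap_nil, zero_add]
  congr 1
  split_ifs with h1 <;> simp_all

theorem pvCore (cs : List Char) :
    pvALoop cs (cs.length - 1) = (pvIdxs cs).foldl max 0 := by
  induction cs using List.reverseRecOn with
  | nil => simp [pvALoop, pvIdxs, PySem.List.enumerate]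
  | append_singleton ds c ih =>
    rw [pvIdxs_append]
    by_cases hc : c = '0'
    · subst hc
      simp only [ne_eq, not_true_eq_false, and_false, if_false, List.append_nil]
      rcases ds with _ | ⟨d, ds'⟩
      · simp [pvALoop, pvIdxs, PySem.List.enumerate]
      · have hlen : (d :: ds' ++ ['0']).length - 1 = (d :: ds').length := by simp
        rw [hlen]
        have hidx : (d :: ds').length = ((d :: ds').length - 1) + 1 := by simp
        rw [hidx]
        simp only [pvALoop]
        have hget : (d :: ds' ++ ['0']).getD (((d :: ds').length - 1) + 1) '\x00' = '0' := by
          rw [← hidx, List.getD_append_right _ _ _ _ (le_refl _)]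
          simp
        rw [hget]
        simp only [ne_eq, not_true_eq_false, if_false]
        rw [pvALoop_append _ _ _ (by simp), ih]
    · rcases ds with _ | ⟨d, ds'⟩
      · simp [pvALoop, pvIdxs, PySem.List.enumerate]
      · have hpos : 0 < ((d :: ds').length : Int) ∧ c ≠ '0' := ⟨by simp, hc⟩
        rw [if_pos hpos]
        have hlen : (d :: ds' ++ [c]).length - 1 = (d :: ds').length := by simp
        rw [hlen]
        have hidx : (d :: ds').length = ((d :: ds').length - 1) + 1 := by simp
        rw [hidx]
        simp only [pvALoop]
        have hget : (d :: ds' ++ [c]).getD (((d :: ds').length - 1) + 1) '\x00' = c := by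
          rw [← hidx, List.getD_append_right _ _ _ _ (le_refl _)]
          simp
        rw [hget]
        simp only [ne_eq, hc, not_false_eq_true, if_true]
        rw [List.foldl_append]
        have hle : (pvIdxs (d :: ds')).foldl max 0 ≤ ((d :: ds').length : Int) :=
          pvFoldMax_le _ _ _ (fun x hx => le_trans (pvIdxs_lt _ x hx) (by omega)) (by exact_mod_cast Nat.zero_le _)
        simp only [List.foldl_cons, List.foldl_nil]
        rw [← hidx]
        omega

-- ===== VERDICT (by name: the statement is the Claim_ definition above) =====
theorem return_index_floats_spec : Claim_equal_return_index_floats := by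
  intro s _
  unfold Spec_return_index_floats return_index_floats return_index_floats_alt
  exact pvCore s.toList
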